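-- pv_equiv track=rewrite | github.com/iamkissg/nowcoder | companies/sogou/古巴比伦迷宫.py | pass_or_not
-- ===== SOURCE A (Python) =====
-- from collections import Counter
--
-- def pass_or_not(pans, M):
--     if not any(pans):
--         return False
--
--     max_len = len(bin(max(pans)))-2
--     bitmap = [[0 for col in range(max_len)] for row in range(len(pans))]
--     bitmap_T = [[0 for col in range(len(pans))] for row in range(max_len)]
--     for ip, p in enumerate(pans):
--         for ib in range(max_len):
--             bitmap[ip][ib] = p >> ib & 1
--             bitmap_T[ib][ip] = p >> ib & 1
--     if any([Counter(bm)[1]==1 for bm in bitmap_T]):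
--         return False
--     # elif some_condition:
--     #     pass
--     else:
--         return True
-- ===== SOURCE B (Python) =====
-- def pass_or_not(pans, M):
--     # One pass: 'once' ORs every plate; 'twice' ORs bits already seen before.
--     # A bit is set in exactly one plate iff it is in 'once' but not 'twice',
--     # so the answer is: some bit exists (once != 0) and none is unique (once == twice).
--     once = 0
--     twice = 0
--     for p in pans:
--         twice |= once & p
--         once |= p
--     return once != 0 and once == twice
-- ===== Notes on version B (the rewrite author's own statement) =====
-- stated objective: faster
-- what changed: Replaces A's per-bit transposed 0/1 matrix plus a Counter per bit column (n*bits Python-level operations) by a single pass that accumulates a seen-once and a seen-at-least-twice bitmask with word-wide integer &,|; the answer is once != 0 and once == twice.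
-- outside the precondition, e.g. on pass_or_not([0, -2], 0): A returns True, B returns False; on pass_or_not([-1, 3], 0): A returns True, B returns False
import Mathlib
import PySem

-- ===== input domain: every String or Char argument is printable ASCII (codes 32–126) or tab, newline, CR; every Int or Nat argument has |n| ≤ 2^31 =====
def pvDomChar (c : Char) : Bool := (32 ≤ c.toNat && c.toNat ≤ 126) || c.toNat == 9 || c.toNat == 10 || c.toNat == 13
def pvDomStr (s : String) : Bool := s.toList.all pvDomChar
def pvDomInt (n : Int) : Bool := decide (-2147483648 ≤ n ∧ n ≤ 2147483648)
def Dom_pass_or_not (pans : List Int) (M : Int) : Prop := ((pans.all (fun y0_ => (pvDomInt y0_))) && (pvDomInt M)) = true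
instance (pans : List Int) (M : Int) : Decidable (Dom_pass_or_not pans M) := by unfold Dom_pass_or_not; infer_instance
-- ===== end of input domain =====

-- ===== PORT A =====
-- B replaces A's per-bit transposed 0/1 matrix + a Counter per bit column by a single pass of
-- word-wide seen-once/seen-twice bitmask accumulation (objective: faster, constant-factor).

-- port of A; 'bitmap' is built by A's loop but never read afterwards, so only the
-- transposed matrix bitmap_T, which A's answer depends on, is materialised.
def pass_or_not (pans : List Int) (M : Int) : Bool :=
  if !(pans.any (fun p => p != 0)) then false    -- if not any(pans): return False
  else
    match PySem.List.max? pans (fun x => x) with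
    | none => false                              -- unreachable: some p != 0, so pans is nonempty
    | some mx =>
      -- max_len = len(bin(max(pans))) - 2
      let max_len : Nat := (PySem.Int.toBinChars0b mx).length - 2
      -- bitmap_T[ib][ip] = pans[ip] >> ib & 1
      let bitmap_T : List (List Int) :=
        (List.range max_len).map (fun ib : Nat => pans.map (fun p : Int => PySem.Int.band (p >>> ib) 1))
      -- if any([Counter(bm)[1] == 1 for bm in bitmap_T]): return False else: return True
      if (bitmap_T.map (fun bm => (PySem.Dict.counter bm).getD 1 0 == 1)).any (fun b => b) then false
      else true

-- ===== PORT B =====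
def pass_or_not_alt (pans : List Int) (M : Int) : Bool :=
  -- once = twice = 0
  -- for p in pans: twice |= once & p; once |= p
  let st : Int × Int :=
    pans.foldl (fun (s : Int × Int) p => (PySem.Int.bor s.1 p, PySem.Int.bor s.2 (PySem.Int.band s.1 p))) (0, 0)
  -- return once != 0 and once == twice
  decide (st.1 ≠ 0) && decide (st.1 = st.2)

-- ===== PRECONDITION & SPEC =====
-- Pre_ restricts to nonnegative plate values, the puzzle's natural domain of bit plates: on
-- negative values A still returns, but its bit matrix is an accident of its implementation
-- (max_len is read off len(bin(max(pans))), which counts the '-' sign character and truncates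
-- the infinite two's-complement expansion of negative plates), while B reads all their bits.
def Pre_pass_or_not (pans : List Int) (M : Int) : Prop := ∀ p ∈ pans, 0 ≤ p
instance (pans : List Int) (M : Int) : Decidable (Pre_pass_or_not pans M) := by
  unfold Pre_pass_or_not; infer_instance
def pvWitness_pass_or_not : List Int × Int := ([1, 2, 3], 0)

def Spec_pass_or_not (pans : List Int) (M : Int) (out : Bool) : Prop := out = pass_or_not_alt pans M
instance (pans : List Int) (M : Int) (out : Bool) : Decidable (Spec_pass_or_not pans M out) := by
  unfold Spec_pass_or_not; infer_instance

-- ===== CLAIM (what is proved, stated in full; the proofs are below) =====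
def Claim_equal_pass_or_not : Prop := ∀ (pans : List Int) (M : Int), Dom_pass_or_not pans M → Pre_pass_or_not pans M → Spec_pass_or_not pans M (pass_or_not pans M)

-- ===== LEMMAS AND PROOFS =====

-- number of plates having bit j set
def pvCnt (pans : List Int) (j : Nat) : Nat := pans.countP (fun p => p.toNat.testBit j)

theorem pvFold_testBit (j : Nat) (l : List Int) (hl : ∀ p ∈ l, 0 ≤ p) :
    ∀ (o t m : Nat), o.testBit j = decide (1 ≤ m) → t.testBit j = decide (2 ≤ m) →
    ∃ o' t' : Nat,
      l.foldl (fun (s : Int × Int) p => (PySem.Int.bor s.1 p, PySem.Int.bor s.2 (PySem.Int.band s.1 p))) ((o : Int), (t : Int)) = ((o' : Int), (t' : Int)) ∧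
      o'.testBit j = decide (1 ≤ m + pvCnt l j) ∧ t'.testBit j = decide (2 ≤ m + pvCnt l j) := by
  induction l with
  | nil => intro o t m ho ht; exact ⟨o, t, rfl, by simpa [pvCnt] using ho, by simpa [pvCnt] using ht⟩
  | cons p tl ih =>
    intro o t m ho ht
    have hp : 0 ≤ p := hl p (by simp)
    obtain ⟨pn, rfl⟩ : ∃ n : Nat, p = (n : Int) := ⟨p.toNat, (Int.toNat_of_nonneg hp).symm⟩
    set b : Nat := if pn.testBit j then 1 else 0 with hb
    have hcnt : pvCnt ((pn : Int) :: tl) j = b + pvCnt tl j := by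
      simp only [pvCnt, List.countP_cons, hb, Int.toNat_natCast]
      by_cases h : pn.testBit j <;> simp [h] <;> omega
    have ho' : (o ||| pn).testBit j = decide (1 ≤ m + b) := by
      rw [Nat.testBit_or, ho, hb]; by_cases h : pn.testBit j <;> simp [h]
    have ht' : (t ||| (o &&& pn)).testBit j = decide (2 ≤ m + b) := by
      rw [Nat.testBit_or, Nat.testBit_and, ht, ho, hb]
      by_cases h : pn.testBit j <;> simp [h] <;> omega
    obtain ⟨o', t', heq, h1, h2⟩ := ih (fun q hq => hl q (by simp [hq])) (o ||| pn) (t ||| (o &&& pn)) (m + b) ho' ht'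
    refine ⟨o', t', ?_, ?_, ?_⟩
    · rw [List.foldl_cons]
      simp only [PySem.Int.bor_natCast, PySem.Int.band_natCast]
      exact heq
    · rw [hcnt, ← Nat.add_assoc]; exact h1
    · rw [hcnt, ← Nat.add_assoc]; exact h2

theorem pvB_iff (pans : List Int) (M : Int) (hp : ∀ p ∈ pans, 0 ≤ p) :
    pass_or_not_alt pans M = true ↔ ((∃ j, 1 ≤ pvCnt pans j) ∧ ∀ j, pvCnt pans j ≠ 1) := by
  have hbit : ∀ j : Nat, ∃ o' t' : Nat,
      pans.foldl (fun (s : Int × Int) p => (PySem.Int.bor s.1 p, PySem.Int.bor s.2 (PySem.Int.band s.1 p))) ((0:Int), (0:Int)) = ((o' : Int), (t' : Int)) ∧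
      o'.testBit j = decide (1 ≤ pvCnt pans j) ∧ t'.testBit j = decide (2 ≤ pvCnt pans j) := by
    intro j
    simpa using pvFold_testBit j pans hp 0 0 0 (by simp) (by simp)
  obtain ⟨o', t', heq, -, -⟩ := hbit 0
  have hfix : ∀ j, o'.testBit j = decide (1 ≤ pvCnt pans j) ∧ t'.testBit j = decide (2 ≤ pvCnt pans j) := by
    intro j
    obtain ⟨o2, t2, heq2, h1, h2⟩ := hbit j
    rw [heq] at heq2
    have e1 : o' = o2 := Int.natCast_inj.mp (congrArg Prod.fst heq2)
    have e2 : t' = t2 := Int.natCast_inj.mp (congrArg Prod.snd heq2)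
    rw [e1, e2]; exact ⟨h1, h2⟩
  unfold pass_or_not_alt
  rw [heq]
  simp only [Bool.and_eq_true, decide_eq_true_eq]
  constructor
  · rintro ⟨h0, he⟩
    have ho' : o' ≠ 0 := fun h => h0 (by exact_mod_cast congrArg (fun n : Nat => (n : Int)) h)
    have hot : o' = t' := Int.natCast_inj.mp he
    constructor
    · by_contra hc
      push_neg at hc
      refine ho' (Nat.eq_of_testBit_eq fun i => ?_)
      rw [(hfix i).1, Nat.zero_testBit]
      have := hc i
      simp only [decide_eq_false_iff_not]
      omega
    · intro j hj
      have h1 := (hfix j).1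
      have h2 := (hfix j).2
      rw [hot] at h1
      rw [h1, hj] at h2
      exact absurd h2 (by decide)
  · rintro ⟨⟨j, hj⟩, hall⟩
    refine ⟨?_, ?_⟩
    · intro h0
      have hz : o' = 0 := Int.natCast_inj.mp (by simpa using h0)
      have hb := (hfix j).1
      rw [hz, Nat.zero_testBit] at hb
      have := of_decide_eq_false hb.symm
      omega
    · have hoeq : o' = t' := Nat.eq_of_testBit_eq fun i => by
        rw [(hfix i).1, (hfix i).2]
        have := hall i
        by_cases h : 1 ≤ pvCnt pans i <;> simp [h] <;> omega
      exact_mod_cast hoeq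

theorem pvRow_count (pans : List Int) (hp : ∀ p ∈ pans, 0 ≤ p) (ib : Nat) :
    (PySem.Dict.counter (pans.map (fun p : Int => PySem.Int.band (p >>> ib) 1))).getD 1 0 = (pvCnt pans ib : Int) := by
  rw [PySem.Dict.getD_counter]
  unfold pvCnt
  induction pans with
  | nil => simp
  | cons p tl ih =>
    have hp0 : 0 ≤ p := hp p (by simp)
    obtain ⟨pn, rfl⟩ : ∃ n : Nat, p = (n : Int) := ⟨p.toNat, (Int.toNat_of_nonneg hp0).symm⟩
    have hsh : ((pn : Int) >>> ib) = ((pn >>> ib : Nat) : Int) := rfl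
    have hband : PySem.Int.band ((pn : Int) >>> ib) 1 = (((pn >>> ib) &&& 1 : Nat) : Int) := by
      rw [hsh]
      exact_mod_cast PySem.Int.band_natCast (pn >>> ib) 1
    have hbit : ((((pn >>> ib) &&& 1 : Nat) : Int) == 1) = pn.testBit ib := by
      rw [Nat.and_one_is_mod]
      have h2 : pn >>> ib % 2 = 0 ∨ pn >>> ib % 2 = 1 := by omega
      rcases h2 with h | h <;>
        simp [h, Nat.testBit, Nat.and_comm 1 (pn >>> ib), Nat.and_one_is_mod]
    have ihn := Int.natCast_inj.mp (ih (fun q hq => hp q (by simp [hq])))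
    rw [List.map_cons, List.count_cons, List.countP_cons, hband, hbit, ihn]
    simp

theorem pvCnt_high (pans : List Int) (mx : Int)
    (hmx : ∀ y ∈ pans, y ≤ mx) (hpos : 0 < mx) (j : Nat)
    (hj : (PySem.Int.toBinChars0b mx).length - 2 ≤ j) : pvCnt pans j = 0 := by
  have hlen : (PySem.Int.toBinChars0b mx).length - 2 = (Nat.toDigits 2 mx.toNat).length := by
    rw [PySem.Int.toBinChars0b]
    rw [if_neg (by omega)]
    simp
  set L := (Nat.toDigits 2 mx.toNat).length with hL
  have hLpos : 0 < L := Nat.length_toDigits_pos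
  have hlt : mx.toNat < 2 ^ L := (Nat.length_toDigits_le_iff (by norm_num) hLpos).mp le_rfl
  rw [hlen] at hj
  rw [pvCnt, List.countP_eq_zero]
  intro p hpmem
  have h1 : p.toNat ≤ mx.toNat := Int.toNat_le_toNat (hmx p hpmem)
  have h2 : p.toNat < 2 ^ j :=
    lt_of_lt_of_le (lt_of_le_of_lt h1 hlt) (Nat.pow_le_pow_right (by norm_num) hj)
  simp [Nat.testBit_lt_two_pow h2]

theorem pv_main (pans : List Int) (M : Int) (hpre : ∀ p ∈ pans, 0 ≤ p) :
    pass_or_not pans M = pass_or_not_alt pans M := by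
  unfold pass_or_not
  by_cases hany : pans.any (fun p => p != 0)
  · -- some plate is nonzero
    rw [if_neg (by simp [hany])]
    obtain ⟨p0, hp0mem, hp0ne⟩ := List.any_eq_true.mp hany
    have hp0ne' : p0 ≠ 0 := by simpa using hp0ne
    have hne : pans ≠ [] := by rintro rfl; simp at hp0mem
    obtain ⟨mx, hmxeq⟩ : ∃ mx, PySem.List.max? pans (fun x => x) = some mx := by
      cases h : PySem.List.max? pans (fun x => x) with
      | none => exact absurd ((PySem.List.max?_eq_none_iff _ _).mp h) hne
      | some mx => exact ⟨mx, rfl⟩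
    have hub : ∀ y ∈ pans, y ≤ mx := PySem.List.max?_isMax hmxeq
    have hmxpos : 0 < mx := lt_of_lt_of_le (lt_of_le_of_ne (hpre p0 hp0mem) (Ne.symm hp0ne')) (hub p0 hp0mem)
    rw [hmxeq]
    simp only
    set L := (PySem.Int.toBinChars0b mx).length - 2 with hLdef
    have hrow : ∀ ib : Nat,
        ((PySem.Dict.counter (pans.map (fun p : Int => PySem.Int.band (p >>> ib) 1))).getD 1 0 == 1)
          = decide (pvCnt pans ib = 1) := by
      intro ib
      rw [pvRow_count pans hpre ib]
      by_cases h : pvCnt pans ib = 1 <;> simp [h]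
    have hcond : (((List.range L).map (fun ib : Nat => pans.map (fun p : Int => PySem.Int.band (p >>> ib) 1))).map
          (fun bm => (PySem.Dict.counter bm).getD 1 0 == 1)).any (fun b => b) = true
        ↔ ∃ ib, pvCnt pans ib = 1 := by
      rw [List.map_map, List.any_eq_true]
      constructor
      · rintro ⟨b, hb, hbt⟩
        obtain ⟨ib, hibmem, rfl⟩ := List.mem_map.mp hb
        rw [Function.comp_apply, hrow ib] at hbt
        exact ⟨ib, by simpa using hbt⟩
      · rintro ⟨ib, hib⟩
        have hiblt : ib < L := by
          by_contra hge
          rw [pvCnt_high pans mx hub hmxpos ib (by omega)] at hib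
          omega
        refine ⟨_, List.mem_map.mpr ⟨ib, List.mem_range.mpr hiblt, rfl⟩, ?_⟩
        rw [Function.comp_apply, hrow ib]
        simpa using hib
    have hBiff := pvB_iff pans M hpre
    by_cases hone : ∃ ib, pvCnt pans ib = 1
    · rw [if_pos (hcond.mpr hone)]
      rcases hone with ⟨ib, hib⟩
      cases hB : pass_or_not_alt pans M with
      | false => rfl
      | true => exact absurd ((hBiff.mp hB).2 ib) (by simp [hib])
    · rw [if_neg (fun h => hone (hcond.mp h))]
      symm
      rw [hBiff]
      refine ⟨?_, fun j hj => hone ⟨j, hj⟩⟩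
      have hp0n : p0.toNat ≠ 0 := fun hz =>
        hp0ne' (le_antisymm (Int.toNat_eq_zero.mp hz) (hpre p0 hp0mem))
      obtain ⟨j, hjbit⟩ : ∃ j, p0.toNat.testBit j := by
        by_contra hc
        push_neg at hc
        exact hp0n (Nat.eq_of_testBit_eq fun i => by simp [hc i])
      exact ⟨j, List.countP_pos_iff.mpr ⟨p0, hp0mem, by simpa using hjbit⟩⟩
  · -- all plates are zero
    rw [if_pos (by simpa using hany)]
    have hzero : ∀ p ∈ pans, p = 0 := by
      intro p hpm
      by_contra hne
      exact hany (List.any_eq_true.mpr ⟨p, hpm, by simpa using hne⟩)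
    symm
    rw [Bool.eq_false_iff]
    intro hB
    obtain ⟨⟨j, hj⟩, -⟩ := (pvB_iff pans M hpre).mp hB
    rw [pvCnt, List.countP_eq_zero.mpr (fun p hpm => by simp [hzero p hpm])] at hj
    omega

-- ===== VERDICT (by name: the statement is the Claim_ definition above) =====
theorem pass_or_not_spec : Claim_equal_pass_or_not := by
  intro pans M _ hpre
  unfold Spec_pass_or_not
  exact pv_main pans M hpre
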